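-- pv_equiv track=rewrite | github.com/sztrok/KODOWANIE-I-KOMPRESJA-DANYCH | Lista 4/test.py | diff_encoding_color
-- ===== SOURCE A (Python) =====
-- def diff_encoding_color(pixels, bits):
--     prev = 0
--     max_value = 2 ** bits
--     min_value = -2 ** bits
--     diffs = []
--     M = list(range(min_value, max_value + 1))
--     for item in pixels:
--         temp = item - prev
--         current = min(M, key=lambda x: abs(x - temp))
--         diffs.append(current)
--         prev = sum(diffs)
--
--     return diffs
-- ===== SOURCE B (Python) =====
-- def diff_encoding_color(pixels, bits):
--     limit = 2 ** bits
--     prev = 0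
--     out = []
--     for item in pixels:
--         d = item - prev
--         if d > limit:
--             d = limit
--         elif d < -limit:
--             d = -limit
--         out.append(d)
--         prev += d
--     return out
-- ===== Notes on version B (the rewrite author's own statement) =====
-- stated objective: faster
-- what changed: B replaces A's per-pixel linear scan of the whole list(range(-2**bits, 2**bits+1)) (and the re-summation of all diffs each step) by a direct O(1) clamp of item-prev to [-2**bits, 2**bits] with a running-sum prev.
import Mathlib
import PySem

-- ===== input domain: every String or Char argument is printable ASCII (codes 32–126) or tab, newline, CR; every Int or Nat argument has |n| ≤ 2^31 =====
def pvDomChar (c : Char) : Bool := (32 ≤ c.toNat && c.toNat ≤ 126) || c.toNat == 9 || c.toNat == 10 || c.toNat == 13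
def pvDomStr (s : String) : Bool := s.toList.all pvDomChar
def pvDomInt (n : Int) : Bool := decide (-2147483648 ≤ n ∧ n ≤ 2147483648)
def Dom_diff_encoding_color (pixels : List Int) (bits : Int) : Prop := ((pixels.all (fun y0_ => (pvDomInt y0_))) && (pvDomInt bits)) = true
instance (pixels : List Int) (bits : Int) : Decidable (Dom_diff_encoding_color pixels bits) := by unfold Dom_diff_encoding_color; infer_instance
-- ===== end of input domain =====

-- B replaces A's per-pixel scan of the full candidate list range(-2^bits, 2^bits+1) and the
-- re-summation of all diffs by an O(1) clamp with a running-sum prev (objective: faster).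

-- ===== PORT A =====
-- 2 ** bits: exact for bits ≥ 0 (Pre_); for bits < 0 Python A raises TypeError (list(range(float...))).
def diff_encoding_color (pixels : List Int) (bits : Int) : List Int :=
  let max_value : Int := 2 ^ bits.toNat
  let min_value : Int := -(2 ^ bits.toNat)
  let M := PySem.List.pyRange min_value (max_value + 1) 1
  let r := pixels.foldl (fun (st : Int × List Int) item =>
      let temp := item - st.1
      -- min(M, key=lambda x: abs(x - temp)); M is nonempty for bits ≥ 0, so Python's min returns
      let current := (PySem.List.min? M (fun x => |x - temp|)).getD 0
      let diffs := st.2 ++ [current]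
      (diffs.sum, diffs)) (0, [])
  r.2

-- ===== PORT B =====
def diff_encoding_color_alt (pixels : List Int) (bits : Int) : List Int :=
  let limit : Int := 2 ^ bits.toNat
  let r := pixels.foldl (fun (st : Int × List Int) item =>
      let d0 := item - st.1
      let d := if d0 > limit then limit else if d0 < -limit then -limit else d0
      (st.1 + d, st.2 ++ [d])) (0, [])
  r.2

-- ===== PRECONDITION & SPEC =====
-- Pre_ excludes exactly the inputs on which Python A raises: bits < 0 (TypeError: 2**bits is a
-- float, so range() rejects it) and bits ≥ 62 (OverflowError: list(range(...)) would have more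
-- than 2^63 - 1 elements).
def Pre_diff_encoding_color (pixels : List Int) (bits : Int) : Prop := 0 ≤ bits ∧ bits < 62
instance (pixels : List Int) (bits : Int) : Decidable (Pre_diff_encoding_color pixels bits) := by
  unfold Pre_diff_encoding_color; infer_instance
def pvWitness_diff_encoding_color : List Int × Int := ([5, -3, 7], 1)

def Spec_diff_encoding_color (pixels : List Int) (bits : Int) (out : List Int) : Prop := out = diff_encoding_color_alt pixels bits
instance (pixels : List Int) (bits : Int) (out : List Int) : Decidable (Spec_diff_encoding_color pixels bits out) := by unfold Spec_diff_encoding_color; infer_instance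

-- ===== CLAIM (what is proved, stated in full; the proofs are below) =====
def Claim_equal_diff_encoding_color : Prop := ∀ (pixels : List Int) (bits : Int), Dom_diff_encoding_color pixels bits → Pre_diff_encoding_color pixels bits → Spec_diff_encoding_color pixels bits (diff_encoding_color pixels bits)

-- ===== LEMMAS AND PROOFS =====

-- The first minimizer of |x - temp| over [-L..L] is the clamp of temp to [-L, L].
lemma pv_clamp_min (L temp : Int) (hL : 0 ≤ L) :
    (PySem.List.min? (PySem.List.pyRange (-L) (L + 1) 1) (fun x => |x - temp|)).getD 0
      = if temp > L then L else if temp < -L then -L else temp := by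
  set c : Int := if temp > L then L else if temp < -L then -L else temp with hc
  have hcmem : c ∈ PySem.List.pyRange (-L) (L + 1) 1 := by
    rw [PySem.List.mem_pyRange_one]
    simp only [hc]; split_ifs <;> omega
  cases h : PySem.List.min? (PySem.List.pyRange (-L) (L + 1) 1) (fun x => |x - temp|) with
  | none =>
      exfalso
      rw [PySem.List.min?_eq_none_iff] at h
      rw [h] at hcmem
      exact (List.not_mem_nil).elim hcmem
  | some m =>
      have hm := PySem.List.min?_mem h
      have hmin := PySem.List.min?_isMin h c hcmem
      rw [PySem.List.mem_pyRange_one] at hm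
      simp only [Option.getD_some]
      rcases abs_cases (m - temp) with ⟨e1, _⟩ | ⟨e1, _⟩ <;>
        rcases abs_cases (c - temp) with ⟨e2, _⟩ | ⟨e2, _⟩ <;>
        simp only [e1, e2] at hmin <;>
        (simp only [hc] at *; split_ifs at * <;> omega)

lemma pv_loop_eq (L : Int) (hL : 0 ≤ L) (pixels : List Int) : ∀ (ds : List Int),
    (pixels.foldl (fun (st : Int × List Int) item =>
        let temp := item - st.1
        let current := (PySem.List.min? (PySem.List.pyRange (-L) (L + 1) 1) (fun x => |x - temp|)).getD 0
        let diffs := st.2 ++ [current]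
        (diffs.sum, diffs)) (ds.sum, ds)).2
    = (pixels.foldl (fun (st : Int × List Int) item =>
        let d0 := item - st.1
        let d := if d0 > L then L else if d0 < -L then -L else d0
        (st.1 + d, st.2 ++ [d])) (ds.sum, ds)).2 := by
  induction pixels with
  | nil => intro ds; rfl
  | cons p t ih =>
      intro ds
      simp only [List.foldl_cons, pv_clamp_min L (p - ds.sum) hL]
      set c : Int := if p - ds.sum > L then L else if p - ds.sum < -L then -L else p - ds.sum with hc
      have hs : ds.sum + c = (ds ++ [c]).sum := by simp
      rw [hs]
      exact ih (ds ++ [c])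

-- ===== VERDICT (by name: the statement is the Claim_ definition above) =====
theorem diff_encoding_color_spec : Claim_equal_diff_encoding_color := by
  intro pixels bits _ _
  unfold Spec_diff_encoding_color diff_encoding_color diff_encoding_color_alt
  have := pv_loop_eq ((2 : Int) ^ bits.toNat) (by positivity) pixels []
  simpa using this
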